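-- pv_equiv track=rewrite | github.com/reisenx/2110101-COM-PROG | GE-Grader-Examination/G6502-Exam-2565-S2/Grader-02/2565_2_Q2_02/2565_2_Q2_02.py | pattern_to_list
-- ===== SOURCE A (Python) =====
-- def pattern_to_list(pattern_str):
--     # Add spaces around brackets and parentheses for splitting
--     temp = (
--         pattern_str.replace("[", " [")
--         .replace("]", "] ")
--         .replace("(", " (")
--         .replace(")", ") ")
--     )
--
--     # Split the string into parts and create a pattern list
--     pattern = []
--     for part in temp.split():
--         # Check if the part has parentheses which indicate a exclude rule
--         if part[0] + part[-1] == "()":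
--             pattern.append([part[1:-1], "exclude"])
--         # Check if the part has brackets which indicate a include rule
--         elif part[0] + part[-1] == "[]":
--             pattern.append([part[1:-1], "include"])
--         # Otherwise, it is a single character with exact or any rule
--         else:
--             # Add each character in the part to the pattern list
--             for char in part:
--                 if char == "?":
--                     pattern.append(["?", "any"])
--                 else:
--                     pattern.append([char, "exact"])
--     # Return the pattern list
--     return pattern
-- ===== SOURCE B (Python) =====
-- def _classify(token, rules):
--     if token[0] == '(' and token[-1] == ')':
--         rules.append([token[1:-1], 'exclude'])
--     elif token[0] == '[' and token[-1] == ']':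
--         rules.append([token[1:-1], 'include'])
--     else:
--         for ch in token:
--             rules.append(['?', 'any'] if ch == '?' else [ch, 'exact'])
--
--
-- def pattern_to_list(pattern_str):
--     # Single pass: tokenize and classify on the fly, no intermediate strings.
--     rules = []
--     buf = ''
--     for c in pattern_str:
--         if c.isspace():
--             if buf:
--                 _classify(buf, rules)
--             buf = ''
--         elif c in '[(':
--             if buf:
--                 _classify(buf, rules)
--             buf = c
--         elif c in '])':
--             _classify(buf + c, rules)
--             buf = ''
--         else:
--             buf += c
--     if buf:
--         _classify(buf, rules)
--     return rules
-- ===== Notes on version B (the rewrite author's own statement) =====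
-- stated objective: idiomatic
-- what changed: Replaced the four .replace passes plus split() and token re-scan by a single-pass character scanner that maintains a buffer and classifies each token the moment it is complete, building no intermediate strings or token list.
import Mathlib
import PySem

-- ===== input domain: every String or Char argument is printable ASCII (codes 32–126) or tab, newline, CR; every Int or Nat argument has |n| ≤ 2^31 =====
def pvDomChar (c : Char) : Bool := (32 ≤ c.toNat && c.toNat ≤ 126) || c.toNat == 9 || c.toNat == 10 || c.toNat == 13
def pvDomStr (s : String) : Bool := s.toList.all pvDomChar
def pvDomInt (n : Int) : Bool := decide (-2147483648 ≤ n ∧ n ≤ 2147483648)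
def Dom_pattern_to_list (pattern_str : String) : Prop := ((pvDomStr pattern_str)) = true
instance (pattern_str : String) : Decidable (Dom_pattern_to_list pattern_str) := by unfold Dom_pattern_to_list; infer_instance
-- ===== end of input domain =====

-- B replaces A's four .replace passes + split() by a single-pass scanner that classifies
-- each token as soon as it is complete (objective: idiomatic single pass, same results).

-- ===== PORT A =====
-- loop body of A's 'for part in temp.split()' (part[0]/part[-1] cannot raise: split() yields non-empty parts)
def pvClassifyA (pattern : List (List String)) (part : String) : List (List String) :=
  let cs := part.toList
  match PySem.List.pyGet? cs 0, PySem.List.pyGet? cs (-1) with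
  | some c0, some cl =>
    if [c0, cl] = ['(', ')'] then
      pattern ++ [[String.ofList (PySem.List.slice cs (some 1) (some (-1))), "exclude"]]
    else if [c0, cl] = ['[', ']'] then
      pattern ++ [[String.ofList (PySem.List.slice cs (some 1) (some (-1))), "include"]]
    else
      cs.foldl (fun p ch =>
        if ch = '?' then p ++ [["?", "any"]] else p ++ [[String.ofList [ch], "exact"]]) pattern
  | _, _ => pattern

def pattern_to_list (pattern_str : String) : List (List String) :=
  let temp := PySem.Str.replace (PySem.Str.replace (PySem.Str.replace
    (PySem.Str.replace pattern_str "[" " [") "]" "] ") "(" " (") ")" ") "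
  (PySem.Str.split₀ temp).foldl pvClassifyA []

-- ===== PORT B =====
-- Source B's _classify helper (token is a run of chars; 'c in "[("' etc. ported as a disjunction)
def pvClassifyB (token : List Char) (rules : List (List String)) : List (List String) :=
  match PySem.List.pyGet? token 0, PySem.List.pyGet? token (-1) with
  | some c0, some cl =>
    if c0 = '(' ∧ cl = ')' then
      rules ++ [[String.ofList (PySem.List.slice token (some 1) (some (-1))), "exclude"]]
    else if c0 = '[' ∧ cl = ']' then
      rules ++ [[String.ofList (PySem.List.slice token (some 1) (some (-1))), "include"]]
    else
      token.foldl (fun r ch =>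
        if ch = '?' then r ++ [["?", "any"]] else r ++ [[String.ofList [ch], "exact"]]) rules
  | _, _ => rules

-- Source B's 'if buf: _classify(buf, rules)'
def pvFlushB (buf : List Char) (rules : List (List String)) : List (List String) :=
  if buf = [] then rules else pvClassifyB buf rules

-- Source B's main loop over the characters of pattern_str
def pvScan : List Char → List Char → List (List String) → List (List String)
  | [], buf, rules => pvFlushB buf rules
  | c :: cs, buf, rules =>
    if PySem.Str.isspace c then pvScan cs [] (pvFlushB buf rules)
    else if c = '[' ∨ c = '(' then pvScan cs [c] (pvFlushB buf rules)
    else if c = ']' ∨ c = ')' then pvScan cs [] (pvClassifyB (buf ++ [c]) rules)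
    else pvScan cs (buf ++ [c]) rules

def pattern_to_list_alt (pattern_str : String) : List (List String) :=
  pvScan pattern_str.toList [] []

-- ===== PRECONDITION & SPEC =====
def Spec_pattern_to_list (pattern_str : String) (out : List (List String)) : Prop := out = pattern_to_list_alt pattern_str
instance (pattern_str : String) (out : List (List String)) : Decidable (Spec_pattern_to_list pattern_str out) := by unfold Spec_pattern_to_list; infer_instance

-- ===== CLAIM (what is proved, stated in full; the proofs are below) =====
def Claim_equal_pattern_to_list : Prop := ∀ (pattern_str : String), Dom_pattern_to_list pattern_str → Spec_pattern_to_list pattern_str (pattern_to_list pattern_str)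

-- ===== LEMMAS AND PROOFS =====

-- what one char of the input contributes to A's 'temp' string
def pvExp (c : Char) : List Char :=
  if c = '[' then [' ', '[']
  else if c = ']' then [']', ' ']
  else if c = '(' then [' ', '(']
  else if c = ')' then [')', ' ']
  else [c]

-- specification tokenizer: the tokens both programs classify, in order
def pvTok : List Char → List Char → List (List Char)
  | [], buf => if buf = [] then [] else [buf]
  | c :: cs, buf =>
    if PySem.Chars.isspace c then (if buf = [] then [] else [buf]) ++ pvTok cs []
    else if c = '[' ∨ c = '(' then (if buf = [] then [] else [buf]) ++ pvTok cs [c]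
    else if c = ']' ∨ c = ')' then (buf ++ [c]) :: pvTok cs []
    else pvTok cs (buf ++ [c])

lemma pvReplace_go_single (o : Char) (new : List Char) :
    ∀ (s : List Char) (fuel : Nat) (acc : List Char), s.length ≤ fuel →
      PySem.Chars.replace.go [o] new fuel s acc
        = acc.reverse ++ s.flatMap (fun c => if c = o then new else [c]) := by
  intro s
  induction s with
  | nil => intro fuel acc _; cases fuel <;> simp [PySem.Chars.replace.go]
  | cons c t ih =>
    intro fuel acc h
    cases fuel with
    | zero => simp at h
    | succ n =>
      have h' : ∀ a, PySem.Chars.replace.go [o] new n t a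
          = a.reverse ++ t.flatMap (fun c => if c = o then new else [c]) :=
        fun a => ih n a (by simpa using h)
      by_cases hc : c = o
      · subst hc
        simp [PySem.Chars.replace.go, List.isPrefixOf, h']
      · have hco : (o == c) = false := by
          simp only [beq_eq_false_iff_ne, ne_eq]; exact fun h' => hc h'.symm
        simp [PySem.Chars.replace.go, List.isPrefixOf, hco, hc, h']

lemma pvReplace_single (s : List Char) (o : Char) (new : List Char) :
    PySem.Chars.replace s [o] new = s.flatMap (fun c => if c = o then new else [c]) := by
  rw [PySem.Chars.replace, if_neg (by simp)]
  simpa using pvReplace_go_single o new s s.length [] le_rfl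

lemma pvTemp_eq (cs : List Char) :
    PySem.Chars.replace (PySem.Chars.replace (PySem.Chars.replace
      (PySem.Chars.replace cs ['['] [' ', '[']) [']'] [']', ' ']) ['('] [' ', '(']) [')'] [')', ' ']
      = cs.flatMap pvExp := by
  rw [pvReplace_single, pvReplace_single, pvReplace_single, pvReplace_single]
  induction cs with
  | nil => simp
  | cons c t ih =>
    simp only [List.flatMap_cons, List.flatMap_append, ih]
    congr 1
    by_cases h1 : c = '['
    · simp [h1, pvExp]
    by_cases h2 : c = ']'
    · simp [h2, pvExp]
    by_cases h3 : c = '('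
    · simp [h3, pvExp]
    by_cases h4 : c = ')' <;> simp [h1, h2, h3, h4, pvExp]

lemma pvSplit_go_eq : ∀ (cs cur : List Char) (acc : List (List Char)),
    PySem.Chars.split₀.go (cs.flatMap pvExp) cur acc = acc.reverse ++ pvTok cs cur.reverse := by
  intro cs
  induction cs with
  | nil =>
    intro cur acc
    by_cases hc : cur = [] <;>
      simp [PySem.Chars.split₀.go, pvTok, hc, List.reverse_eq_nil_iff]
  | cons c cs ih =>
    intro cur acc
    by_cases h1 : c = '['
    · subst h1
      by_cases hc : cur = [] <;>
        simp [List.flatMap_cons, pvExp, PySem.Chars.split₀.go, pvTok,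
          PySem.Chars.isspace, ih, hc]
    by_cases h2 : c = ']'
    · subst h2
      by_cases hc : cur = [] <;>
        simp [List.flatMap_cons, pvExp, PySem.Chars.split₀.go, pvTok,
          PySem.Chars.isspace, ih, hc]
    by_cases h3 : c = '('
    · subst h3
      by_cases hc : cur = [] <;>
        simp [List.flatMap_cons, pvExp, PySem.Chars.split₀.go, pvTok,
          PySem.Chars.isspace, ih, hc]
    by_cases h4 : c = ')'
    · subst h4
      by_cases hc : cur = [] <;>
        simp [List.flatMap_cons, pvExp, PySem.Chars.split₀.go, pvTok,
          PySem.Chars.isspace, ih, hc]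
    by_cases hs : PySem.Chars.isspace c = true
    · by_cases hc : cur = [] <;>
        simp [List.flatMap_cons, pvExp, h1, h2, h3, h4, PySem.Chars.split₀.go,
          pvTok, hs, ih, hc]
    · simp [List.flatMap_cons, pvExp, h1, h2, h3, h4, PySem.Chars.split₀.go,
        pvTok, hs, ih]

lemma pvClassify_eq (p : List (List String)) (t : List Char) :
    pvClassifyA p (String.ofList t) = pvClassifyB t p := by
  simp only [pvClassifyA, pvClassifyB, String.toList_ofList]
  cases h0 : PySem.List.pyGet? t 0 <;> cases h1 : PySem.List.pyGet? t (-1) <;> simp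

lemma pvScan_eq : ∀ (cs buf : List Char) (rules : List (List String)),
    pvScan cs buf rules = (pvTok cs buf).foldl (fun r t => pvClassifyB t r) rules := by
  intro cs
  induction cs with
  | nil =>
    intro buf rules
    by_cases hb : buf = [] <;> simp [pvScan, pvTok, pvFlushB, hb]
  | cons c cs ih =>
    intro buf rules
    simp only [pvScan, pvTok, PySem.Str.isspace]
    by_cases hs : PySem.Chars.isspace c = true
    · rw [if_pos hs, if_pos hs, ih, List.foldl_append]
      by_cases hb : buf = [] <;> simp [hb, pvFlushB]
    · rw [if_neg hs, if_neg hs]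
      by_cases hbr : c = '[' ∨ c = '('
      · rw [if_pos hbr, if_pos hbr, ih, List.foldl_append]
        by_cases hb : buf = [] <;> simp [hb, pvFlushB]
      · rw [if_neg hbr, if_neg hbr]
        by_cases hcl : c = ']' ∨ c = ')'
        · rw [if_pos hcl, if_pos hcl, ih]; simp
        · rw [if_neg hcl, if_neg hcl]; exact ih (buf ++ [c]) rules

-- ===== VERDICT (by name: the statement is the Claim_ definition above) =====
theorem pattern_to_list_spec : Claim_equal_pattern_to_list := by
  intro s _
  unfold Spec_pattern_to_list pattern_to_list pattern_to_list_alt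
  simp only [PySem.Str.replace, PySem.Str.split₀, String.toList_ofList]
  simp only [show "[".toList = ['['] from rfl, show " [".toList = [' ', '['] from rfl,
    show "]".toList = [']'] from rfl, show "] ".toList = [']', ' '] from rfl,
    show "(".toList = ['('] from rfl, show " (".toList = [' ', '('] from rfl,
    show ")".toList = [')'] from rfl, show ") ".toList = [')', ' '] from rfl]
  rw [pvTemp_eq, List.foldl_map]
  have h := pvSplit_go_eq s.toList [] []
  simp only [List.reverse_nil] at h
  rw [show PySem.Chars.split₀ (s.toList.flatMap pvExp)
        = PySem.Chars.split₀.go (s.toList.flatMap pvExp) [] [] from rfl, h]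
  rw [pvScan_eq]
  simp only [List.nil_append, pvClassify_eq]
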